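-- pv_equiv track=rewrite | github.com/WojDob/sequence-analysis-dashboard | app.py | count_symbols
-- ===== SOURCE A (Python) =====
-- def count_symbols(sequence):
--     contents = {}
--     for symbol in sequence:
--         if symbol in contents:
--             contents[symbol] += 1
--         else:
--             contents[symbol] = 1
--     symbols = []
--     counts = []
--     for key, value in contents.items():
--         symbols.append(key)
--         counts.append(value)
--     return symbols, counts
-- ===== SOURCE B (Python) =====
-- def count_symbols(sequence):
--     # No counting dict: collect distinct symbols in first-appearance order,
--     # then count each one with its own scan over the sequence.
--     symbols = []
--     for symbol in sequence:
--         if symbol not in symbols: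
--             symbols.append(symbol)
--     counts = [sum(1 for c in sequence if c == symbol) for symbol in symbols]
--     return symbols, counts
-- ===== Notes on version B (the rewrite author's own statement) =====
-- stated objective: alternative
-- what changed: Replaces the hash-counter pass with a dict-free unique-then-count algorithm: distinct symbols are collected in first-appearance order by list membership, then each distinct symbol is counted by its own scan of the sequence.
import Mathlib
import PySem

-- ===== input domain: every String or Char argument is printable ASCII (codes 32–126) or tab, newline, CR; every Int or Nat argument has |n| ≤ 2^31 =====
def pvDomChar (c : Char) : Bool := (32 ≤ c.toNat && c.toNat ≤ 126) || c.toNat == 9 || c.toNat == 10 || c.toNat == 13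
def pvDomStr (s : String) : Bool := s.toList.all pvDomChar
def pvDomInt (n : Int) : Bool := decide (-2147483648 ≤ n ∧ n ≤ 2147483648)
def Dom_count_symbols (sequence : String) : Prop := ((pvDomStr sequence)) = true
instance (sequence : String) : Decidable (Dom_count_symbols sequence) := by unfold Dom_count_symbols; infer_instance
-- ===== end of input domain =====

-- B replaces A's hash-counter pass by a dict-free unique-then-count algorithm (alternative decomposition, not faster).

-- ===== PORT A =====
-- A's first loop body: if symbol in contents: contents[symbol] += 1 else: contents[symbol] = 1
def pvStepA (d : PySem.Dict String Int) (symbol : String) : PySem.Dict String Int :=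
  if d.contains symbol then d.insert symbol (d.getD symbol 0 + 1) else d.insert symbol 1

-- A's second loop body: symbols.append(key); counts.append(value)
def pvUnpackA (p : List String × List Int) (kv : String × Int) : List String × List Int :=
  (p.1 ++ [kv.1], p.2 ++ [kv.2])

def count_symbols (sequence : String) : List String × List Int :=
  let contents := (sequence.toList.map (fun c => String.ofList [c])).foldl pvStepA PySem.Dict.empty
  contents.items.foldl pvUnpackA ([], [])

-- ===== PORT B =====
-- B's first loop body: if symbol not in symbols: symbols.append(symbol)  (list membership, no dict)
def pvDedupB (symbols : List String) (symbol : String) : List String :=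
  if symbols.contains symbol then symbols else symbols ++ [symbol]

-- sum(1 for c in sequence if c == symbol)
def pvCountB (chars : List String) (symbol : String) : Int :=
  chars.foldl (fun acc c => if c == symbol then acc + 1 else acc) 0

def count_symbols_alt (sequence : String) : List String × List Int :=
  let chars := sequence.toList.map (fun c => String.ofList [c])
  let symbols := chars.foldl pvDedupB []
  (symbols, symbols.map (pvCountB chars))

-- ===== PRECONDITION & SPEC =====
def Spec_count_symbols (sequence : String) (out : List String × List Int) : Prop := out = count_symbols_alt sequence
instance (sequence : String) (out : List String × List Int) : Decidable (Spec_count_symbols sequence out) := by unfold Spec_count_symbols; infer_instance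

-- ===== CLAIM (what is proved, stated in full; the proofs are below) =====
def Claim_equal_count_symbols : Prop := ∀ (sequence : String), Dom_count_symbols sequence → Spec_count_symbols sequence (count_symbols sequence)

-- ===== LEMMAS AND PROOFS =====

-- A's dict loop is the standard counter loop (the else-branch inserts 1 = getD 0 + 1).
theorem pvStepA_eq : pvStepA = (fun (d : PySem.Dict String Int) x => d.insert x (d.getD x 0 + 1)) := by
  funext d x
  unfold pvStepA
  by_cases h : d.contains x = true
  · simp [h]
  · rw [if_neg h, PySem.Dict.getD_of_not_contains d 0 (by simpa using h)]
    norm_num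

-- A's second loop unzips the items list.
theorem pvUnpackA_foldl (l : List (String × Int)) (ys : List String) (zs : List Int) :
    l.foldl pvUnpackA (ys, zs) = (ys ++ l.map (·.1), zs ++ l.map (·.2)) := by
  induction l generalizing ys zs with
  | nil => simp
  | cons kv t ih => simp [pvUnpackA, ih]

-- A's result in closed form: the distinct symbols in first-occurrence order, each with its count.
theorem count_symbols_closed (sequence : String) :
    count_symbols sequence =
      (PySem.Set.ofList ((sequence.toList.map (fun c => String.ofList [c]))),
       (PySem.Set.ofList ((sequence.toList.map (fun c => String.ofList [c])))).map
         (fun s => ((sequence.toList.map (fun c => String.ofList [c])).count s : Int))) := by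
  unfold count_symbols
  rw [pvStepA_eq, PySem.Dict.foldl_insert_getD_add_one_eq_counter, pvUnpackA_foldl,
    PySem.Dict.items_counter]
  simp [List.map_map, Function.comp_def]

-- B's dedup loop builds exactly the ordered set of distinct elements.
theorem pvDedupB_eq_ofList (l : List String) : l.foldl pvDedupB [] = PySem.Set.ofList l := by
  rw [PySem.Set.ofList_eq_foldl]
  have h : pvDedupB = PySem.Set.add := by
    funext acc x
    simp [pvDedupB, PySem.Set.add, PySem.Set.contains]
  rw [h]

-- B's per-symbol scan counts occurrences.
theorem pvCountB_eq (chars : List String) (s : String) : pvCountB chars s = (chars.count s : Int) := by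
  unfold pvCountB
  rw [PySem.List.foldl_beq_add_one]
  simp

-- ===== VERDICT (by name: the statement is the Claim_ definition above) =====
theorem count_symbols_spec : Claim_equal_count_symbols := by
  intro s _
  unfold Spec_count_symbols
  rw [count_symbols_closed]
  show _ = (_, _)
  simp only [pvDedupB_eq_ofList]
  exact Prod.ext rfl (List.map_congr_left (fun x _ => (pvCountB_eq _ x).symm))
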